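-- pv_equiv track=rewrite | github.com/idapython/src | inject_pydoc.py | split_oneliner_comments
-- ===== SOURCE A (Python) =====
-- DOCSTR_MARKER  = "\"\"\""
--
-- def split_oneliner_comments(lines):
--     out_lines = []
--     for line in lines:
--
--         line = line.rstrip()
--
--         if line.startswith("#"):
--             out_lines.append(line)
--             continue
--
--         if len(line) == 0:
--             out_lines.append("")
--             continue
--
--         pfx = None
--         while line.find(DOCSTR_MARKER) > -1:
--             idx  = line.find(DOCSTR_MARKER)
--             meat = line[0:idx]
--             try:
--                 if len(meat.strip()) == 0:
--                     pfx = meat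
--                     out_lines.append(pfx + DOCSTR_MARKER)
--                 else:
--                     out_lines.append((pfx if pfx is not None else "") + meat)
--                     out_lines.append((pfx if pfx is not None else "") + DOCSTR_MARKER)
--             except:
--                 raise BaseException("Error at line: " + line)
--             line = line[idx + len(DOCSTR_MARKER):]
--         if len(line.strip()) > 0:
--             out_lines.append((pfx if pfx is not None else "") + line)
--     return out_lines
-- ===== SOURCE B (Python) =====
-- DOCSTR_MARKER = "\"\"\""
--
-- def split_oneliner_comments(lines):
--     out_lines = []
--     for line in lines:
--         line = line.rstrip()
--         if line.startswith("#"):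
--             out_lines.append(line)
--             continue
--         if len(line) == 0:
--             out_lines.append("")
--             continue
--         parts = line.split(DOCSTR_MARKER)
--         pfx = None
--         for meat in parts[:-1]:
--             if len(meat.strip()) == 0:
--                 pfx = meat
--                 out_lines.append(meat + DOCSTR_MARKER)
--             else:
--                 p = pfx if pfx is not None else ""
--                 out_lines.append(p + meat)
--                 out_lines.append(p + DOCSTR_MARKER)
--         rest = parts[-1]
--         if len(rest.strip()) > 0:
--             out_lines.append((pfx if pfx is not None else "") + rest)
--     return out_lines
-- ===== Notes on version B (the rewrite author's own statement) =====
-- stated objective: idiomatic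
-- what changed: The while-find/slice rescanning loop is replaced by one up-front line.split(DOCSTR_MARKER): iterate the parts before each marker as the successive 'meat' values and handle the last part as the remainder, keeping the rstrip/'#'/empty guards.
import Mathlib
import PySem

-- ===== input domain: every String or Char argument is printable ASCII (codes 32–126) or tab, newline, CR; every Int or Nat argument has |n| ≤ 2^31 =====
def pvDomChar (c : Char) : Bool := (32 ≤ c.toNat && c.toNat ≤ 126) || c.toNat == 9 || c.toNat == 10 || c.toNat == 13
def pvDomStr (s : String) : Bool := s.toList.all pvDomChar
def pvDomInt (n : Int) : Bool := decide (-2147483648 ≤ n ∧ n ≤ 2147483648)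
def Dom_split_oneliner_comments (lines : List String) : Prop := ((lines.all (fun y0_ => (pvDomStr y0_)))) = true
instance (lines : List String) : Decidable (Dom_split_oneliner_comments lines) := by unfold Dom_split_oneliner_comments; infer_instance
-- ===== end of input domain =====

-- B replaces A's while-find/slice rescanning loop by one up-front split on the marker (idiomatic decomposition, same cost).

-- DOCSTR_MARKER = '"""'
def pvMarker : List Char := ['"', '"', '"']

-- lemma the recursive port cites for termination: a found marker means the line is nonempty
theorem pvFindLenPos (s : List Char) (h : PySem.Chars.find s pvMarker > -1) : 0 < s.length := by
  have hinf : pvMarker <:+: s := (PySem.Chars.find_nonneg_iff s pvMarker).mp (by omega)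
  have := hinf.length_le
  simp [pvMarker] at this
  omega

-- slice bridge cited by the port's decreasing_by: line[idx+3:] is a drop
theorem pvSliceDrop (s : List Char) (k : Nat) :
    PySem.Chars.slice s (some ((k : Int) + 3)) none = s.drop (k + 3) := by
  have h : ((k : Int) + 3) = (((k + 3 : Nat)) : Int) := by push_cast; ring
  rw [PySem.Chars.slice_eq_listSlice, h, PySem.List.slice_from_natCast]

-- ===== PORT A =====
-- A's inner `while line.find(DOCSTR_MARKER) > -1` loop; state = (line, pfx, out_lines).
-- line[0:idx] and line[idx+3:] are PySem slices (idx = find ≥ 0 here).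
def pvLoopA (line : List Char) (pfx : Option (List Char)) (out : List String) : List String :=
  if h : PySem.Chars.find line pvMarker > -1 then
    let idx : Nat := (PySem.Chars.find line pvMarker).toNat
    let meat := PySem.Chars.slice line (some 0) (some (idx : Int))
    let out' :=
      if (PySem.Chars.strip meat).length = 0 then
        out ++ [String.ofList (meat ++ pvMarker)]                     -- pfx = meat; append pfx + marker
      else
        out ++ [String.ofList (pfx.getD [] ++ meat), String.ofList (pfx.getD [] ++ pvMarker)]
    let pfx' := if (PySem.Chars.strip meat).length = 0 then some meat else pfx
    pvLoopA (PySem.Chars.slice line (some ((idx : Int) + 3)) none) pfx' out'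
  else
    if (PySem.Chars.strip line).length > 0 then out ++ [String.ofList (pfx.getD [] ++ line)] else out
termination_by line.length
decreasing_by
  have h0 := pvFindLenPos line h
  rw [pvSliceDrop]
  simp
  omega

def split_oneliner_comments (lines : List String) : List String :=
  lines.foldl (fun out line0 =>
    let line := PySem.Chars.rstrip line0.toList
    if PySem.Chars.startswith line ['#'] then out ++ [String.ofList line]
    else if line.length = 0 then out ++ [""]
    else pvLoopA line none out) []

-- ===== PORT B =====
-- body of B's `for meat in parts[:-1]` loop; state = (pfx, out_lines)
def pvEmit (st : Option (List Char) × List String) (meat : List Char) : Option (List Char) × List String :=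
  if (PySem.Chars.strip meat).length = 0 then
    (some meat, st.2 ++ [String.ofList (meat ++ pvMarker)])
  else
    (st.1, st.2 ++ [String.ofList (st.1.getD [] ++ meat), String.ofList (st.1.getD [] ++ pvMarker)])

def split_oneliner_comments_alt (lines : List String) : List String :=
  lines.foldl (fun out line0 =>
    let line := PySem.Chars.rstrip line0.toList
    if PySem.Chars.startswith line ['#'] then out ++ [String.ofList line]
    else if line.length = 0 then out ++ [""]
    else
      let parts := PySem.Chars.splitOn line pvMarker               -- line.split(DOCSTR_MARKER)
      let st := (PySem.List.slice parts none (some (-1))).foldl pvEmit (none, out)   -- parts[:-1]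
      let rest := PySem.List.pyGetD parts (-1) []                  -- parts[-1]; split never returns [], default unreachable
      if (PySem.Chars.strip rest).length > 0 then st.2 ++ [String.ofList (st.1.getD [] ++ rest)]
      else st.2) []

-- ===== PRECONDITION & SPEC =====
def Spec_split_oneliner_comments (lines : List String) (out : List String) : Prop := out = split_oneliner_comments_alt lines
instance (lines : List String) (out : List String) : Decidable (Spec_split_oneliner_comments lines out) := by unfold Spec_split_oneliner_comments; infer_instance

-- ===== CLAIM (what is proved, stated in full; the proofs are below) =====
def Claim_equal_split_oneliner_comments : Prop := ∀ (lines : List String), Dom_split_oneliner_comments lines → Spec_split_oneliner_comments lines (split_oneliner_comments lines)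

-- ===== LEMMAS AND PROOFS =====

theorem pvSliceTake (s : List Char) (k : Nat) :
    PySem.Chars.slice s (some 0) (some (k : Int)) = s.take k := by
  simp [PySem.List.slice_to_natCast]

-- helper: prepend to the head of a list of strings
def pvMapHead (p : List Char) : List (List Char) → List (List Char)
  | [] => []
  | h :: t => (p ++ h) :: t

-- recursive characterization of `line.split(marker)` by first occurrence
def pvSplitRec (s : List Char) : List (List Char) :=
  if h : PySem.Chars.find s pvMarker > -1 then
    s.take (PySem.Chars.find s pvMarker).toNat
      :: pvSplitRec (s.drop ((PySem.Chars.find s pvMarker).toNat + 3))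
  else [s]
termination_by s.length
decreasing_by
  have h0 := pvFindLenPos s h
  simp
  omega

theorem pvMapHead_nil (t : List (List Char)) : pvMapHead [] t = t := by
  cases t <;> simp [pvMapHead]

theorem pvMapHead_mapHead (a b : List Char) (t : List (List Char)) :
    pvMapHead a (pvMapHead b t) = pvMapHead (a ++ b) t := by
  cases t <;> simp [pvMapHead]

theorem pvSplitRec_ne_nil (s : List Char) : pvSplitRec s ≠ [] := by
  rw [pvSplitRec]
  split <;> simp

theorem pvFindEqOfFirst (s sub : List Char) (m : Nat) (h1 : sub <+: s.drop m)
    (h2 : ∀ i < m, ¬ sub <+: s.drop i) : PySem.Chars.find s sub = m := by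
  have hinf : sub <:+: s := h1.isInfix.trans (List.drop_suffix m s).isInfix
  have h0 : 0 ≤ PySem.Chars.find s sub := (PySem.Chars.find_nonneg_iff s sub).mpr hinf
  obtain ⟨hp, hmin⟩ := PySem.Chars.find_spec (s := s) (sub := sub) h0
  rcases lt_trichotomy ((PySem.Chars.find s sub).toNat) m with hlt | heq | hgt
  · exact absurd hp (h2 _ hlt)
  · omega
  · exact absurd h1 (hmin m hgt)

theorem pvFindZero (s : List Char) (h : pvMarker <+: s) : PySem.Chars.find s pvMarker = 0 := by
  have := pvFindEqOfFirst s pvMarker 0 (by simpa using h) (by omega)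
  simpa using this

theorem pvFindConsSucc (c : Char) (rest : List Char) (h : ¬ pvMarker <+: (c :: rest))
    (hr : 0 ≤ PySem.Chars.find rest pvMarker) :
    PySem.Chars.find (c :: rest) pvMarker = PySem.Chars.find rest pvMarker + 1 := by
  obtain ⟨hp, hmin⟩ := PySem.Chars.find_spec (s := rest) (sub := pvMarker) hr
  have := pvFindEqOfFirst (c :: rest) pvMarker ((PySem.Chars.find rest pvMarker).toNat + 1)
    (by simpa using hp)
    (by
      intro i hi
      cases i with
      | zero => simpa using h
      | succ j => simpa using hmin j (by omega))
  omega

theorem pvFindConsNeg (c : Char) (rest : List Char) (h : ¬ pvMarker <+: (c :: rest))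
    (hr : PySem.Chars.find rest pvMarker = -1) :
    PySem.Chars.find (c :: rest) pvMarker = -1 := by
  rw [PySem.Chars.find_eq_neg_one_iff] at hr ⊢
  intro hinf
  rcases List.infix_cons_iff.mp hinf with hpre | hinf'
  · exact h hpre
  · exact hr hinf'

theorem pvSplitRec_cons (c : Char) (rest : List Char) (h : ¬ pvMarker <+: (c :: rest)) :
    pvSplitRec (c :: rest) = pvMapHead [c] (pvSplitRec rest) := by
  by_cases hr : PySem.Chars.find rest pvMarker > -1
  · have hr' : 0 ≤ PySem.Chars.find rest pvMarker := by omega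
    have hsucc := pvFindConsSucc c rest h hr'
    conv_lhs => rw [pvSplitRec]
    conv_rhs => rw [pvSplitRec]
    rw [dif_pos (by omega : PySem.Chars.find (c :: rest) pvMarker > -1), dif_pos hr]
    have htn : (PySem.Chars.find (c :: rest) pvMarker).toNat
        = (PySem.Chars.find rest pvMarker).toNat + 1 := by omega
    simp [htn, pvMapHead, List.take_succ_cons, List.drop_succ_cons]
  · have hr' : PySem.Chars.find rest pvMarker = -1 := by
      have := PySem.Chars.neg_one_le_find (s := rest) (sub := pvMarker); omega
    have hneg := pvFindConsNeg c rest h hr'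
    conv_lhs => rw [pvSplitRec]
    conv_rhs => rw [pvSplitRec]
    rw [dif_neg (by omega : ¬ PySem.Chars.find (c :: rest) pvMarker > -1),
        dif_neg (by omega : ¬ PySem.Chars.find rest pvMarker > -1)]
    simp [pvMapHead]

theorem pvGoNil (fuel : Nat) (cur : List Char) (acc : List (List Char)) :
    PySem.Chars.splitOn.go pvMarker (fuel + 1) [] cur acc = (cur.reverse :: acc).reverse := rfl

theorem pvGoCons (fuel : Nat) (c : Char) (rest cur : List Char) (acc : List (List Char)) :
    PySem.Chars.splitOn.go pvMarker (fuel + 1) (c :: rest) cur acc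
      = if pvMarker.isPrefixOf (c :: rest) then
          PySem.Chars.splitOn.go pvMarker fuel (List.drop pvMarker.length (c :: rest)) []
            (cur.reverse :: acc)
        else PySem.Chars.splitOn.go pvMarker fuel rest (c :: cur) acc := rfl

theorem pvFindNilNeg : PySem.Chars.find ([] : List Char) pvMarker = -1 := by
  rw [PySem.Chars.find_eq_neg_one_iff]
  intro hinf
  have := hinf.length_le
  simp [pvMarker] at this

theorem pvGoEq (fuel : Nat) (s cur : List Char) (acc : List (List Char)) (hf : s.length < fuel) :
    PySem.Chars.splitOn.go pvMarker fuel s cur acc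
      = acc.reverse ++ pvMapHead cur.reverse (pvSplitRec s) := by
  induction fuel generalizing s cur acc with
  | zero => omega
  | succ fuel ih =>
    cases s with
    | nil =>
      rw [pvGoNil]
      rw [pvSplitRec, dif_neg (by rw [pvFindNilNeg]; omega)]
      simp [pvMapHead]
    | cons c rest =>
      rw [pvGoCons]
      by_cases hp : pvMarker.isPrefixOf (c :: rest)
      · have hpre : pvMarker <+: (c :: rest) := List.isPrefixOf_iff_prefix.mp hp
        rw [if_pos hp]
        have hdrop : (List.drop pvMarker.length (c :: rest)).length < fuel := by
          simp [pvMarker] at hf ⊢; omega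
        rw [ih _ _ _ hdrop]
        have hz := pvFindZero (c :: rest) hpre
        conv_rhs => rw [pvSplitRec]
        rw [dif_pos (by rw [hz]; omega)]
        have hml : pvMarker.length = 3 := rfl
        simp [hml, hz, pvMapHead]
        cases pvSplitRec (List.drop 2 rest) <;> rfl
      · have hnp : ¬ pvMarker <+: (c :: rest) := fun hx =>
          hp (List.isPrefixOf_iff_prefix.mpr hx)
        rw [if_neg hp]
        rw [ih _ _ _ (by simp at hf ⊢; omega)]
        rw [pvSplitRec_cons c rest hnp]
        rw [pvMapHead_mapHead]
        simp

theorem pvSplitOnEq (s : List Char) : PySem.Chars.splitOn s pvMarker = pvSplitRec s := by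
  unfold PySem.Chars.splitOn
  rw [pvGoEq s.length.succ s [] [] (by omega)]
  simp [pvMapHead_nil]

def pvLastD (l : List (List Char)) : List Char := (l.getLast?).getD []

theorem pvLastD_cons (a : List Char) (t : List (List Char)) (h : t ≠ []) :
    pvLastD (a :: t) = pvLastD t := by
  cases t with
  | nil => exact absurd rfl h
  | cons b t' => simp [pvLastD]

-- A's while loop equals B's fold over the split parts
theorem pvLoopEq (n : Nat) (line : List Char) (hn : line.length = n)
    (pfx : Option (List Char)) (out : List String) :
    pvLoopA line pfx out =
      (let st := (pvSplitRec line).dropLast.foldl pvEmit (pfx, out)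
       let rest := pvLastD (pvSplitRec line)
       if (PySem.Chars.strip rest).length > 0 then st.2 ++ [String.ofList (st.1.getD [] ++ rest)]
       else st.2) := by
  induction n using Nat.strong_induction_on generalizing line pfx out with
  | _ n ih =>
  subst hn
  rw [pvLoopA]
  by_cases h : PySem.Chars.find line pvMarker > -1
  · rw [dif_pos h]
    rw [pvSplitRec, dif_pos h]
    set k := (PySem.Chars.find line pvMarker).toNat with hk
    simp only [pvSliceTake, pvSliceDrop]
    have hne := pvSplitRec_ne_nil (line.drop (k + 3))
    have h0 := pvFindLenPos line h
    have hlen : (line.drop (k + 3)).length < line.length := by simp; omega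
    rw [ih (line.drop (k + 3)).length hlen _ rfl]
    rw [List.dropLast_cons_of_ne_nil hne, pvLastD_cons _ _ hne]
    rw [List.foldl_cons]
    have hemit : pvEmit (pfx, out) (line.take k)
        = (if (PySem.Chars.strip (line.take k)).length = 0 then some (line.take k) else pfx,
           if (PySem.Chars.strip (line.take k)).length = 0 then
             out ++ [String.ofList (line.take k ++ pvMarker)]
           else
             out ++ [String.ofList (pfx.getD [] ++ line.take k), String.ofList (pfx.getD [] ++ pvMarker)]) := by
      rw [pvEmit]; split <;> simp_all
    rw [hemit]
  · rw [dif_neg h]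
    rw [pvSplitRec, dif_neg h]
    simp [pvLastD]

theorem pvPyGetDLast (l : List (List Char)) (h : l ≠ []) :
    PySem.List.pyGetD l (-1) [] = pvLastD l := by
  rw [PySem.List.pyGetD_neg_one l [] h, pvLastD, List.getLast?_eq_some_getLast h]
  rfl

-- per-line bodies of the two folds agree
theorem pvLineEq (line : List Char) (out : List String) :
    (if PySem.Chars.startswith line ['#'] then out ++ [String.ofList line]
     else if line.length = 0 then out ++ [""]
     else pvLoopA line none out)
    = (if PySem.Chars.startswith line ['#'] then out ++ [String.ofList line]
       else if line.length = 0 then out ++ [""]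
       else
         let parts := PySem.Chars.splitOn line pvMarker
         let st := (PySem.List.slice parts none (some (-1))).foldl pvEmit (none, out)
         let rest := PySem.List.pyGetD parts (-1) []
         if (PySem.Chars.strip rest).length > 0 then st.2 ++ [String.ofList (st.1.getD [] ++ rest)]
         else st.2) := by
  by_cases h1 : PySem.Chars.startswith line ['#']
  · simp [h1]
  · by_cases h2 : line.length = 0
    · simp [h1, h2]
    · rw [if_neg h1, if_neg h1, if_neg h2, if_neg h2]
      rw [pvLoopEq line.length line rfl none out]
      have hne := pvSplitRec_ne_nil line
      rw [pvSplitOnEq]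
      simp only [PySem.List.slice_to_neg_one, pvPyGetDLast _ hne]

-- ===== VERDICT (by name: the statement is the Claim_ definition above) =====
theorem split_oneliner_comments_spec : Claim_equal_split_oneliner_comments := by
  intro lines _
  unfold Spec_split_oneliner_comments split_oneliner_comments split_oneliner_comments_alt
  apply PySem.List.foldl_congr_mem
  intro out line0 _
  exact pvLineEq (PySem.Chars.rstrip line0.toList) out
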